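-- pv_equiv track=rewrite | github.com/pspxiaochen/LeetCode_Solution | #717_1-bit_and_2-bit_Characters.py | isOneBitCharacter_2
-- ===== SOURCE A (Python) =====
-- def isOneBitCharacter_2(bits):
--     i = 0
--     while i < len(bits) - 1:
--         if bits[i] == 0:
--             i += 1
--         else:
--             i += 2
--     return i == len(bits) - 1
-- ===== SOURCE B (Python) =====
-- def isOneBitCharacter_2(bits):
--     i = len(bits) - 2
--     ones = 0
--     while i >= 0 and bits[i] != 0:
--         ones += 1
--         i -= 1
--     return bool(bits) and ones % 2 == 0
-- ===== Notes on version B (the rewrite author's own statement) =====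
-- stated objective: alternative
-- what changed: B replaces A's forward decoding pass (pointer stepping +1/+2 over the whole list) with a backward scan that only counts the run of consecutive non-zero elements immediately before the last element and returns whether that count is even.
import Mathlib
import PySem

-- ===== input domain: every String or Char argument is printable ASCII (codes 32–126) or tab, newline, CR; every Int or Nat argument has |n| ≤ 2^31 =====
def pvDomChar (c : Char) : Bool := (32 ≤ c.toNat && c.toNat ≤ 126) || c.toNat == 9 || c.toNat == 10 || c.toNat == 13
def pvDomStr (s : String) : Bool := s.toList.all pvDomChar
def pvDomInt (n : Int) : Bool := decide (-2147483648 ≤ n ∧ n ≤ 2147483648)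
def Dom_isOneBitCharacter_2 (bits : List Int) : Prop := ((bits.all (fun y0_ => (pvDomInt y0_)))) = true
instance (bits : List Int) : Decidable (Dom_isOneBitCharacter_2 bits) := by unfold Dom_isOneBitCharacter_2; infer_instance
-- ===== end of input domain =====

-- B scans right-to-left, counting the run of consecutive non-zero elements before the last one
-- and returning its parity, instead of A's forward decoding pass (objective: alternative algorithm).

-- ===== PORT A =====
-- A's while loop: i steps forward by 1 on a 0 bit and by 2 otherwise, while i < len(bits)-1.
-- bits[i] is read only with 0 ≤ i < len(bits)-1, so List.getD is exact here.
def pvLoopA (bits : List Int) (i : Nat) : Int :=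
  if h : (i : Int) < (bits.length : Int) - 1 then
    if bits.getD i 0 = 0 then pvLoopA bits (i + 1) else pvLoopA bits (i + 2)
  else (i : Int)
termination_by bits.length - i
decreasing_by all_goals omega

def isOneBitCharacter_2 (bits : List Int) : Bool :=
  decide (pvLoopA bits 0 = (bits.length : Int) - 1)

-- ===== PORT B =====
-- B's while loop: starting at i = len(bits)-2, count consecutive non-zero elements leftwards.
-- bits[i] is read only with 0 ≤ i ≤ len(bits)-2, so List.getD is exact here.
def pvLoopB (bits : List Int) (i : Int) (ones : Nat) : Nat :=
  if h : 0 ≤ i ∧ bits.getD i.toNat 0 ≠ 0 then pvLoopB bits (i - 1) (ones + 1) else ones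
termination_by (i + 1).toNat
decreasing_by omega

def isOneBitCharacter_2_alt (bits : List Int) : Bool :=
  !bits.isEmpty && (pvLoopB bits ((bits.length : Int) - 2) 0) % 2 == 0

-- ===== PRECONDITION & SPEC =====
def Spec_isOneBitCharacter_2 (bits : List Int) (out : Bool) : Prop := out = isOneBitCharacter_2_alt bits
instance (bits : List Int) (out : Bool) : Decidable (Spec_isOneBitCharacter_2 bits out) := by unfold Spec_isOneBitCharacter_2; infer_instance

-- ===== CLAIM (what is proved, stated in full; the proofs are below) =====
def Claim_equal_isOneBitCharacter_2 : Prop := ∀ (bits : List Int), Dom_isOneBitCharacter_2 bits → Spec_isOneBitCharacter_2 bits (isOneBitCharacter_2 bits)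

-- ===== LEMMAS AND PROOFS =====

-- middle spec 1: structural decoding rule
def fA : List Int → Bool
  | [] => false
  | [_] => true
  | b :: c :: rest => if b = 0 then fA (c :: rest) else fA rest

-- middle spec 2: length of the leading run of non-zero elements
def runL : List Int → Nat
  | [] => 0
  | x :: xs => if x = 0 then 0 else runL xs + 1

lemma fA_singleton (xs : List Int) (h : xs.length = 1) : fA xs = true := by
  match xs, h with
  | [_], _ => rfl

-- A's loop from index i decides fA of the suffix from i
lemma pvLoopA_fA (bits : List Int) (i : Nat) :
    decide (pvLoopA bits i = (bits.length : Int) - 1) = fA (bits.drop i) := by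
  rw [pvLoopA]
  split
  · rename_i h
    have hi1 : i < bits.length := by omega
    have hi2 : i + 1 < bits.length := by omega
    have hd : bits.drop i = bits[i] :: bits.drop (i + 1) := List.drop_eq_getElem_cons hi1
    have hd2 : bits.drop (i + 1) = bits[i+1] :: bits.drop (i + 2) := List.drop_eq_getElem_cons hi2
    have hg : bits.getD i 0 = bits[i] := List.getD_eq_getElem bits 0 hi1
    rw [hg, hd, hd2, fA]
    split
    · rw [← hd2, ← pvLoopA_fA bits (i+1)]
    · rw [← pvLoopA_fA bits (i+2)]
  · rename_i h
    rcases Nat.lt_or_ge i bits.length with hlt | hge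
    · have : i = bits.length - 1 := by omega
      subst this
      have hlen : (bits.drop (bits.length - 1)).length = 1 := by
        simp [List.length_drop]; omega
      rw [fA_singleton _ hlen]
      simp; omega
    · rw [List.drop_eq_nil_of_le hge]
      simp [fA]; omega
termination_by bits.length - i
decreasing_by all_goals omega

lemma isOneBitCharacter_2_eq_fA (bits : List Int) : isOneBitCharacter_2 bits = fA bits := by
  have := pvLoopA_fA bits 0
  simpa [isOneBitCharacter_2] using this

-- B's loop from index j-1 adds the run length of the reversed prefix of length j
lemma pvLoopB_runL (bits : List Int) (j : Nat) (ones : Nat) (hj : j ≤ bits.length) :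
    pvLoopB bits ((j : Int) - 1) ones = ones + runL ((bits.take j).reverse) := by
  induction j generalizing ones with
  | zero =>
    rw [pvLoopB]
    norm_num [runL]
  | succ k ih =>
    have hk : k < bits.length := by omega
    have hget : bits.getD k 0 = bits[k] := List.getD_eq_getElem bits 0 hk
    have htake : bits.take (k + 1) = bits.take k ++ [bits[k]] := List.take_succ_eq_append_getElem hk
    have htoN : (((k : Nat) : Int) + 1 - 1).toNat = k := by omega
    rw [pvLoopB]
    push_cast
    rw [htake, List.reverse_append]
    simp only [List.reverse_singleton, List.singleton_append, runL]
    split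
    · rename_i h
      rw [htoN, hget] at h
      rw [if_neg h.2]
      have hstep : ((k : Nat) : Int) + 1 - 1 - 1 = ((k : Nat) : Int) - 1 := by ring
      rw [hstep, ih (ones + 1) (by omega)]
      ring
    · rename_i h
      rw [htoN, hget] at h
      push Not at h
      have hz : bits[k] = 0 := h (by omega)
      rw [if_pos hz]
      simp

lemma runL_le (ys : List Int) : runL ys ≤ ys.length := by
  induction ys with
  | nil => simp [runL]
  | cons x xs ih =>
    rw [runL]
    split
    · simp
    · simpa using ih

lemma runL_append_full (ys : List Int) (b : Int) (h : runL ys = ys.length) :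
    runL (ys ++ [b]) = runL ys + runL [b] := by
  induction ys with
  | nil => simp [runL]
  | cons x xs ih =>
    by_cases hx : x = 0
    · exfalso
      rw [runL, if_pos hx] at h
      simp at h
    · rw [runL, if_neg hx] at h
      simp only [List.length_cons] at h
      have e2 : runL (x :: (xs ++ [b])) = runL (xs ++ [b]) + 1 := by rw [runL, if_neg hx]
      have e3 : runL (x :: xs) = runL xs + 1 := by rw [runL, if_neg hx]
      rw [List.cons_append, e2, e3, ih (by omega)]
      omega

lemma runL_append_notfull (ys : List Int) (b : Int) (h : runL ys ≠ ys.length) :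
    runL (ys ++ [b]) = runL ys := by
  induction ys with
  | nil => exact absurd rfl h
  | cons x xs ih =>
    by_cases hx : x = 0
    · simp only [List.cons_append, runL, if_pos hx]
    · rw [runL, if_neg hx] at h
      simp only [List.length_cons] at h
      have e2 : runL (x :: (xs ++ [b])) = runL (xs ++ [b]) + 1 := by rw [runL, if_neg hx]
      have e3 : runL (x :: xs) = runL xs + 1 := by rw [runL, if_neg hx]
      rw [List.cons_append, e2, e3, ih (by omega)]

lemma fA_eq_P (bits : List Int) :
    fA bits = (!bits.isEmpty && (runL bits.dropLast.reverse % 2 == 0)) := by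
  match bits with
  | [] => rfl
  | [b] => simp [fA, runL]
  | b :: c :: rest =>
    rw [fA]
    split
    · rename_i hb
      subst hb
      rw [fA_eq_P (c :: rest)]
      have hdl : ((0:Int) :: c :: rest).dropLast = 0 :: (c :: rest).dropLast := rfl
      rw [hdl, List.reverse_cons]
      set zs := (c :: rest).dropLast.reverse with hzs
      have hz0 : runL (zs ++ [(0:Int)]) = runL zs := by
        rcases eq_or_ne (runL zs) zs.length with hfull | hfull
        · rw [runL_append_full zs 0 hfull]; simp [runL]
        · exact runL_append_notfull zs 0 hfull
      rw [hz0]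
      simp
    · rename_i hb
      match rest with
      | [] =>
        rw [fA]
        have hrev : ((b : Int) :: c :: ([]:List Int)).dropLast.reverse = [b] := rfl
        rw [hrev]
        simp [runL, hb]
      | r :: rs =>
        rw [fA_eq_P (r :: rs)]
        have hdl : ((b : Int) :: c :: r :: rs).dropLast = b :: c :: (r :: rs).dropLast := rfl
        rw [hdl]
        have hrev : ((b : Int) :: c :: (r :: rs).dropLast).reverse
            = ((r :: rs).dropLast.reverse ++ [c]) ++ [b] := by simp
        rw [hrev]
        set zs := (r :: rs).dropLast.reverse with hzs
        have hb1 : runL [b] = 1 := by simp [runL, hb]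
        have hpar : runL ((zs ++ [c]) ++ [b]) % 2 = runL zs % 2 := by
          rcases eq_or_ne (runL zs) zs.length with hfull | hfull
          · by_cases hc : c = 0
            · have h1 : runL (zs ++ [c]) = runL zs := by
                rw [runL_append_full zs c hfull, hc]; simp [runL]
              have h2 : runL ((zs ++ [c]) ++ [b]) = runL (zs ++ [c]) := by
                apply runL_append_notfull
                rw [h1]; simp; omega
              rw [h2, h1]
            · have hc1 : runL [c] = 1 := by simp [runL, hc]
              have h1 : runL (zs ++ [c]) = runL zs + 1 := by
                rw [runL_append_full zs c hfull, hc1]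
              have h2 : runL ((zs ++ [c]) ++ [b]) = runL zs + 2 := by
                rw [runL_append_full (zs ++ [c]) b (by rw [h1]; simp; omega), h1, hb1]
              rw [h2]
              omega
          · have hle := runL_le zs
            have h1 : runL (zs ++ [c]) = runL zs := runL_append_notfull zs c hfull
            have h2 : runL ((zs ++ [c]) ++ [b]) = runL (zs ++ [c]) := by
              apply runL_append_notfull
              rw [h1]; simp; omega
            rw [h2, h1]
        have hpar2 : runL (zs ++ [c, b]) % 2 = runL zs % 2 := by
          rw [show zs ++ [c, b] = (zs ++ [c]) ++ [b] from by simp]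
          exact hpar
        simp [hpar2]

lemma alt_eq_P (bits : List Int) :
    isOneBitCharacter_2_alt bits = (!bits.isEmpty && (runL bits.dropLast.reverse % 2 == 0)) := by
  match bits with
  | [] => decide
  | x :: xs =>
    have hlen : ((x :: xs).length : Int) - 2 = ((((x :: xs).length - 1 : Nat)) : Int) - 1 := by
      simp; omega
    rw [isOneBitCharacter_2_alt, hlen, pvLoopB_runL _ _ _ (by omega), ← List.dropLast_eq_take]
    simp

-- ===== VERDICT (by name: the statement is the Claim_ definition above) =====
theorem isOneBitCharacter_2_spec : Claim_equal_isOneBitCharacter_2 := by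
  intro bits _
  unfold Spec_isOneBitCharacter_2
  rw [isOneBitCharacter_2_eq_fA, fA_eq_P, alt_eq_P]
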